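-- pv_equiv track=rewrite | github.com/ansh5441/experiments | advent_of_code/2022/day_03/sol_2.py | find_item_in_3_bags
-- ===== SOURCE A (Python) =====
-- from collections import defaultdict
--
-- def find_item_in_3_bags(bag_1: str, bag_2: str, bag_3: str):
--   item_bag_no = defaultdict(set)
--   for item in bag_1:
--     item_bag_no[item].add(1)
--   for item in bag_2:
--     item_bag_no[item].add(2)
--   for item in bag_3:
--     item_bag_no[item].add(3)
--   for item, bag_set in item_bag_no.items():
--     if len(bag_set) == 3:
--       return item
-- ===== SOURCE B (Python) =====
-- def find_item_in_3_bags(bag_1: str, bag_2: str, bag_3: str):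
--   s2 = set(bag_2)
--   s3 = set(bag_3)
--   for item in bag_1:
--     if item in s2 and item in s3:
--       return item
-- ===== Notes on version B (the rewrite author's own statement) =====
-- stated objective: simpler
-- what changed: Replaces A's defaultdict mapping each item to the set of bag numbers it occurs in (three tagging passes plus a final scan of the dict) by two membership sets over bag_2 and bag_3 and a single ordered scan of bag_1 returning the first item present in both.
import Mathlib
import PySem

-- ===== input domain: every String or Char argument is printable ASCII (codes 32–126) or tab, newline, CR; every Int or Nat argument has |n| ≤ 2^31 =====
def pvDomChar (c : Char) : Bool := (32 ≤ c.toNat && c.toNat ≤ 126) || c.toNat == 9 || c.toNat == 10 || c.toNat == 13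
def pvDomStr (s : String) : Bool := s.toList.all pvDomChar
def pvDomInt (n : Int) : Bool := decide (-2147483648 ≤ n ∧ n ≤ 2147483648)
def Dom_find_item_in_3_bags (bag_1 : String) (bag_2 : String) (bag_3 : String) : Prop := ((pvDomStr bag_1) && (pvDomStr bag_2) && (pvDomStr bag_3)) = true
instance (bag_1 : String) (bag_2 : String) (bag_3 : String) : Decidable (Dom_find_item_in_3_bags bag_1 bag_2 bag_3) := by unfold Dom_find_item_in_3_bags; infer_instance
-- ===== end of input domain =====

-- B replaces A's defaultdict of bag-number sets by two membership sets over bag_2/bag_3 and a single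
-- ordered scan of bag_1 (simpler decomposition; same result, including the earliest-common-item tie-break).


-- ===== PORT A =====
-- item_bag_no = defaultdict(set); three passes tagging each item with the bag numbers 1/2/3 it occurs
-- in; then the first dict key (insertion order) whose bag set has size 3 is returned (None if none).
def find_item_in_3_bags (bag_1 : String) (bag_2 : String) (bag_3 : String) : Option String :=
  let d0 : PySem.Dict Char (PySem.Set Int) := PySem.Dict.empty
  let d1 := bag_1.toList.foldl (fun d item => d.modify item PySem.Set.empty (fun s => PySem.Set.add s 1)) d0
  let d2 := bag_2.toList.foldl (fun d item => d.modify item PySem.Set.empty (fun s => PySem.Set.add s 2)) d1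
  let d3 := bag_3.toList.foldl (fun d item => d.modify item PySem.Set.empty (fun s => PySem.Set.add s 3)) d2
  (d3.items.find? (fun p => PySem.Set.len p.2 == 3)).map (fun p => String.ofList [p.1])

-- ===== PORT B =====
-- s2 = set(bag_2); s3 = set(bag_3); first item of bag_1 contained in both (None if none).
def find_item_in_3_bags_alt (bag_1 : String) (bag_2 : String) (bag_3 : String) : Option String :=
  let s2 := PySem.Set.ofList bag_2.toList
  let s3 := PySem.Set.ofList bag_3.toList
  (bag_1.toList.find? (fun item => PySem.Set.contains s2 item && PySem.Set.contains s3 item)).map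
    (fun item => String.ofList [item])

-- ===== PRECONDITION & SPEC =====
def Spec_find_item_in_3_bags (bag_1 : String) (bag_2 : String) (bag_3 : String) (out : Option String) : Prop := out = find_item_in_3_bags_alt bag_1 bag_2 bag_3
instance (bag_1 : String) (bag_2 : String) (bag_3 : String) (out : Option String) : Decidable (Spec_find_item_in_3_bags bag_1 bag_2 bag_3 out) := by unfold Spec_find_item_in_3_bags; infer_instance

-- ===== CLAIM (what is proved, stated in full; the proofs are below) =====
def Claim_equal_find_item_in_3_bags : Prop := ∀ (bag_1 : String) (bag_2 : String) (bag_3 : String), Dom_find_item_in_3_bags bag_1 bag_2 bag_3 → Spec_find_item_in_3_bags bag_1 bag_2 bag_3 (find_item_in_3_bags bag_1 bag_2 bag_3)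

-- ===== LEMMAS AND PROOFS =====

-- find? on two predicates that agree on the list's members
theorem find?_congr_mem {α : Type} (p q : α → Bool) (l : List α)
    (h : ∀ x ∈ l, p x = q x) : List.find? p l = List.find? q l := by
  induction l with
  | nil => rfl
  | cons a t ih =>
    simp only [List.find?_cons, h a (List.mem_cons_self ..)]
    cases hq : q a with
    | true => rfl
    | false => exact ih (fun x hx => h x (List.mem_cons_of_mem _ hx))

-- the first element of s.update(xs) satisfying p is the first of s, else the first of xs
theorem find?_set_update {α : Type} [BEq α] [LawfulBEq α] (p : α → Bool) (xs : List α)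
    (s : PySem.Set α) :
    List.find? p (PySem.Set.update s xs) = (List.find? p s).or (List.find? p xs) := by
  induction xs generalizing s with
  | nil => simp [PySem.Set.update_nil]
  | cons x t ih =>
    rw [PySem.Set.update_cons, ih, List.find?_cons]
    by_cases hm : x ∈ s
    · rw [PySem.Set.add_of_mem hm]
      cases hs : List.find? p s with
      | some a => simp
      | none =>
        cases hp : p x with
        | false => simp
        | true =>
          exact absurd (List.find?_eq_none.mp hs x hm) (by simp [hp])
    · rw [PySem.Set.add_of_not_mem hm, List.find?_append]
      cases hs : List.find? p s with
      | some a => simp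
      | none => cases hp : p x <;> simp [hp]

-- the bag-number set accumulated by one tagging pass of A
theorem getD_tag_pass (v : Int) (l : List Char) (d : PySem.Dict Char (PySem.Set Int)) (c : Char) :
    (l.foldl (fun d x => d.modify x PySem.Set.empty (fun s => PySem.Set.add s v)) d).getD c PySem.Set.empty
      = if c ∈ l then PySem.Set.add (d.getD c PySem.Set.empty) v
        else d.getD c PySem.Set.empty := by
  induction l generalizing d with
  | nil => simp
  | cons x t ih =>
    simp only [List.foldl_cons, ih, PySem.Dict.getD_modify, List.mem_cons]
    by_cases hc : c = x
    · subst hc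
      by_cases hm : c ∈ t
      · simp only [hm, if_true, or_true, PySem.Set.add_eq_ite]
        split_ifs <;> simp_all
      · simp [hm]
    · simp [hc]

-- size-3 test on the final dict value = membership in all three bags
theorem len_tag_eq_three (l1 l2 l3 : List Char) (c : Char) :
    (PySem.Set.len
      ((l3.foldl (fun d x => d.modify x PySem.Set.empty (fun s => PySem.Set.add s 3))
        (l2.foldl (fun d x => d.modify x PySem.Set.empty (fun s => PySem.Set.add s 2))
          (l1.foldl (fun d x => d.modify x PySem.Set.empty (fun s => PySem.Set.add s 1))
            (PySem.Dict.empty : PySem.Dict Char (PySem.Set Int))))).getD c PySem.Set.empty) == 3)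
      = (decide (c ∈ l1) && decide (c ∈ l2) && decide (c ∈ l3)) := by
  simp only [getD_tag_pass]
  by_cases h1 : c ∈ l1 <;> by_cases h2 : c ∈ l2 <;> by_cases h3 : c ∈ l3 <;>
    simp [h1, h2, h3, PySem.Dict.getD_empty]

-- the key scan of A's final dict reduces to a scan of bag_1 when the predicate implies membership in bag_1
theorem find?_first_bag (q : Char → Bool) (l1 l2 l3 : List Char) (h : ∀ c, q c = true → c ∈ l1) :
    List.find? q (PySem.Set.update (PySem.Set.update (PySem.Set.ofList l1) l2) l3)
      = List.find? q l1 := by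
  have h2 : List.find? q l1 = none → List.find? q l2 = none := fun h1 =>
    List.find?_eq_none.mpr (fun x _ hq => (List.find?_eq_none.mp h1) x (h x hq) hq)
  have h3 : List.find? q l1 = none → List.find? q l3 = none := fun h1 =>
    List.find?_eq_none.mpr (fun x _ hq => (List.find?_eq_none.mp h1) x (h x hq) hq)
  rw [find?_set_update, find?_set_update, ← PySem.Set.update_nil_left, find?_set_update]
  cases h1 : List.find? q l1 with
  | some a => simp
  | none => simp [h2 h1, h3 h1]

-- ===== VERDICT (by name: the statement is the Claim_ definition above) =====
theorem find_item_in_3_bags_spec : Claim_equal_find_item_in_3_bags := by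
  intro bag_1 bag_2 bag_3 _
  unfold Spec_find_item_in_3_bags find_item_in_3_bags find_item_in_3_bags_alt
  show (((((bag_3.toList.foldl (fun d x => d.modify x PySem.Set.empty (fun s => PySem.Set.add s 3))
        (bag_2.toList.foldl (fun d x => d.modify x PySem.Set.empty (fun s => PySem.Set.add s 2))
          (bag_1.toList.foldl (fun d x => d.modify x PySem.Set.empty (fun s => PySem.Set.add s 1))
            (PySem.Dict.empty : PySem.Dict Char (PySem.Set Int))))).items.find?
        (fun p => PySem.Set.len p.2 == 3)).map (fun p => String.ofList [p.1]))
    = ((bag_1.toList.find? (fun item =>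
          PySem.Set.contains (PySem.Set.ofList bag_2.toList) item &&
          PySem.Set.contains (PySem.Set.ofList bag_3.toList) item)).map
        (fun item => String.ofList [item]))))
  set l1 := bag_1.toList with hl1
  set l2 := bag_2.toList with hl2
  set l3 := bag_3.toList with hl3
  set d3 := l3.foldl (fun d x => d.modify x PySem.Set.empty (fun s => PySem.Set.add s 3))
      (l2.foldl (fun d x => d.modify x PySem.Set.empty (fun s => PySem.Set.add s 2))
        (l1.foldl (fun d x => d.modify x PySem.Set.empty (fun s => PySem.Set.add s 1))
          (PySem.Dict.empty : PySem.Dict Char (PySem.Set Int)))) with hd3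
  have hnd : d3.keys.Nodup := by
    rw [hd3]
    refine PySem.Dict.nodup_keys_foldl_insert_key l3 (fun x => x) _ _ ?_
    refine PySem.Dict.nodup_keys_foldl_insert_key l2 (fun x => x) _ _ ?_
    refine PySem.Dict.nodup_keys_foldl_insert_key l1 (fun x => x) _ _ ?_
    exact List.nodup_nil
  have hkeys : d3.keys = PySem.Set.update (PySem.Set.update (PySem.Set.ofList l1) l2) l3 := by
    rw [hd3, PySem.Dict.keys_foldl_modify, PySem.Dict.keys_foldl_modify,
        PySem.Dict.keys_foldl_modify, PySem.Dict.keys_empty, PySem.Set.update_nil_left]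
  rw [PySem.Dict.items_eq_map_keys d3 hnd PySem.Set.empty, List.find?_map, Option.map_map]
  have hpred : ∀ k ∈ d3.keys,
      ((fun p => PySem.Set.len p.2 == 3) ∘ (fun k => (k, d3.getD k PySem.Set.empty))) k
        = (fun c => decide (c ∈ l1) && decide (c ∈ l2) && decide (c ∈ l3)) k := by
    intro k _
    simp only [Function.comp]
    rw [hd3]
    exact len_tag_eq_three l1 l2 l3 k
  rw [find?_congr_mem _ _ _ hpred, hkeys,
      find?_first_bag _ l1 l2 l3 (by intro c hq; simp at hq; exact hq.1.1)]
  rw [find?_congr_mem _ (fun item =>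
        PySem.Set.contains (PySem.Set.ofList l2) item &&
        PySem.Set.contains (PySem.Set.ofList l3) item) l1 ?_]
  · rfl
  · intro x hx
    by_cases hm2 : x ∈ l2 <;> by_cases hm3 : x ∈ l3 <;>
      simp [hx, hm2, hm3, PySem.Set.contains_eq_listContains, PySem.Set.mem_ofList]
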